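-- pv_equiv track=rewrite | github.com/leejin21/algProbSolve-PY | 07_strSearch/interWordSearch.py | dicSearch
-- ===== SOURCE A (Python) =====
-- def dicSearch(a_dic, b_dic):
--     cnt = 0
--     if len(a_dic) >= len(b_dic):
--         for word in b_dic:
--             if word in a_dic:
--                 cnt += 1
--     else:
--         for word in a_dic:
--             if word in b_dic:
--                 cnt += 1
--     return cnt
-- ===== SOURCE B (Python) =====
-- def dicSearch(a_dic, b_dic):
--     if len(a_dic) >= len(b_dic):
--         small, big = b_dic, a_dic
--     else:
--         small, big = a_dic, b_dic
--     big_set = set(big)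
--     return sum(small.count(w) for w in set(small) if w in big_set)
-- ===== Notes on version B (the rewrite author's own statement) =====
-- stated objective: faster
-- what changed: Replaces A's per-element list-membership loop by a count-by-distinct-keys formulation: B materializes both sides as sets once and sums the multiplicities of the shorter side's distinct words that occur in the other side's set.
import Mathlib
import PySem

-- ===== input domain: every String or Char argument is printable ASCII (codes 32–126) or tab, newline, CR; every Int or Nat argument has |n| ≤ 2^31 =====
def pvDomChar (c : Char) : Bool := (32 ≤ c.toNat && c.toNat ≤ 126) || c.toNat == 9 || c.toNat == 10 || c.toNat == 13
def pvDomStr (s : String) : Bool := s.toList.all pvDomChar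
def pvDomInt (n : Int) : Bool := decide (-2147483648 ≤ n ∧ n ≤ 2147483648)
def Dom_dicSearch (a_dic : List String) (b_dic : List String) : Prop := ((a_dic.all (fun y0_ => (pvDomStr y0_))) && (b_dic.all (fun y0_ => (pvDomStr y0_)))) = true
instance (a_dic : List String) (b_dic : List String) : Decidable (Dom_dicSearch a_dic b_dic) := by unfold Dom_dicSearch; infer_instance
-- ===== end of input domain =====

-- B replaces A's per-element membership loop by summing, over the distinct words of the
-- shorter side, their multiplicities when they occur in the other side's key set
-- (objective: alternative formulation, same exact result).

-- ===== PORT A =====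
def dicSearch (a_dic : List String) (b_dic : List String) : Int :=
  let cnt : Int := 0
  if a_dic.length ≥ b_dic.length then
    b_dic.foldl (fun cnt word => if word ∈ a_dic then cnt + 1 else cnt) cnt
  else
    a_dic.foldl (fun cnt word => if word ∈ b_dic then cnt + 1 else cnt) cnt

-- ===== PORT B =====
def dicSearch_alt (a_dic : List String) (b_dic : List String) : Int :=
  let sb := if a_dic.length ≥ b_dic.length then (b_dic, a_dic) else (a_dic, b_dic)
  let small := sb.1
  let bigSet : PySem.Set String := PySem.Set.ofList sb.2
  -- sum over set(small): order-independent (a sum), so exact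
  (PySem.Set.ofList small).foldl
    (fun s w => s + (if PySem.Set.contains bigSet w then (small.count w : Int) else 0)) 0

-- ===== PRECONDITION & SPEC =====
def Spec_dicSearch (a_dic : List String) (b_dic : List String) (out : Int) : Prop := out = dicSearch_alt a_dic b_dic
instance (a_dic : List String) (b_dic : List String) (out : Int) : Decidable (Spec_dicSearch a_dic b_dic out) := by unfold Spec_dicSearch; infer_instance

-- ===== CLAIM (what is proved, stated in full; the proofs are below) =====
def Claim_equal_dicSearch : Prop := ∀ (a_dic : List String) (b_dic : List String), Dom_dicSearch a_dic b_dic → Spec_dicSearch a_dic b_dic (dicSearch a_dic b_dic)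

-- ===== LEMMAS AND PROOFS =====

-- A's counting loop computes the length of the filtered list.
theorem pv_count_fold (big : List String) :
    ∀ (l : List String) (c : Int),
      l.foldl (fun cnt word => if word ∈ big then cnt + 1 else cnt) c
        = c + ((l.filter (fun w => decide (w ∈ big))).length : Int) := by
  intro l
  induction l with
  | nil => simp
  | cons x xs ih =>
    intro c
    by_cases hx : x ∈ big <;> simp [List.foldl_cons, hx, ih, add_assoc, add_comm]

-- B's summing loop is the sum of the mapped list.
theorem pv_sum_fold (f : String → Int) :
    ∀ (l : List String) (s : Int),
      l.foldl (fun s w => s + f w) s = s + (l.map f).sum := by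
  intro l
  induction l with
  | nil => simp
  | cons x xs ih =>
    intro s
    simp [List.foldl_cons, ih, add_assoc]

-- cast of a Nat-valued sum into Int, elementwise
theorem pv_sum_natCast (l : List String) (f : String → Nat) :
    ((l.map fun w => ((f w : Nat) : Int)).sum) = ((l.map f).sum : Int) := by
  induction l with
  | nil => simp
  | cons x xs ih => simp [ih]

-- Core identity: summing multiplicities over the distinct members of `small` that lie in
-- `big` equals the number of members of `small` (with multiplicity) that lie in `big`.
theorem pv_dedup_count_sum (small big : List String) :
    ((PySem.Set.ofList small).map
        (fun w => if w ∈ big then small.count w else 0)).sum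
      = (small.filter (fun w => decide (w ∈ big))).length := by
  rw [← PySem.List.dedup_eq_ofList]
  rw [← List.sum_toFinset _ (PySem.List.nodup_dedup small)]
  have ht : (PySem.List.dedup small).toFinset = small.toFinset := by
    ext a; simp
  rw [ht]
  have h1 : ∑ a ∈ small.toFinset, (if a ∈ big then small.count a else 0)
      = ∑ a ∈ small.toFinset.filter (fun a => a ∈ big), small.count a := by
    rw [Finset.sum_filter]
  have h2 : small.toFinset.filter (fun a => a ∈ big)
      = (small.filter (fun w => decide (w ∈ big))).toFinset := by
    ext a; simp
  have h3 : ∀ a ∈ (small.filter (fun w => decide (w ∈ big))).toFinset,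
      small.count a = (small.filter (fun w => decide (w ∈ big))).count a := by
    intro a ha
    simp only [List.mem_toFinset, List.mem_filter] at ha
    have h := List.count_filter (l := small) (p := fun w => decide (w ∈ big)) (a := a) ha.2
    omega
  rw [h1, h2, Finset.sum_congr rfl h3, List.sum_toFinset_count_eq_length]

-- the shared branch shape: B's set-sum equals A's membership-counting loop
theorem pv_branch (small big : List String) :
    (PySem.Set.ofList small).foldl
        (fun s w => s + (if PySem.Set.contains (PySem.Set.ofList big) w then (small.count w : Int) else 0)) 0
      = small.foldl (fun cnt word => if word ∈ big then cnt + 1 else cnt) (0 : Int) := by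
  rw [pv_count_fold big small 0, pv_sum_fold _ (PySem.Set.ofList small) 0]
  have hmap : ((PySem.Set.ofList small).map
      (fun w => if PySem.Set.contains (PySem.Set.ofList big) w then (small.count w : Int) else 0))
      = ((PySem.Set.ofList small).map
          (fun w => (((if w ∈ big then small.count w else 0 : Nat)) : Int))) := by
    apply List.map_congr_left
    intro w _
    by_cases hw : w ∈ big
    · rw [if_pos ((PySem.Set.contains_iff _ _).mpr ((PySem.Set.mem_ofList _ _).mpr hw)),
        if_pos hw]
    · rw [if_neg (fun h => hw ((PySem.Set.mem_ofList _ _).mp ((PySem.Set.contains_iff _ _).mp h))),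
        if_neg hw]
      simp
  rw [hmap, pv_sum_natCast, pv_dedup_count_sum small big]

-- ===== VERDICT (by name: the statement is the Claim_ definition above) =====
theorem dicSearch_spec : Claim_equal_dicSearch := by
  intro a_dic b_dic _hdom
  unfold Spec_dicSearch dicSearch dicSearch_alt
  by_cases h : a_dic.length >= b_dic.length <;> simp only [h, if_pos, ite_false] <;>
    exact (pv_branch _ _).symm
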